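-- pv_equiv track=rewrite | github.com/aimin-tang/comp_programming | usaco/2022/dice.py | d3_exists
-- ===== SOURCE A (Python) =====
-- def compare_dice(d1, d2):
--     # see if d1 beats d2
--     result = 0
--     for n1 in d1:
--         for n2 in d2:
--             if n1 > n2:
--                 result += 1
--             elif n1 < n2:
--                 result -= 1
--             else:
--                 # tie
--                 continue
--
--     return result
--
-- def d3_exists(d1, d2):
--     for n1 in range(1, 11):
--         for n2 in range(1, 11):
--             for n3 in range(1, 11):
--                 for n4 in range(1, 11):
--                     d = [n1, n2, n3, n4]
--                     if compare_dice(d, d1) > 0 and compare_dice(d1, d2) > 0 \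
--                         and compare_dice(d2, d) > 0:
--                         return 'yes'
--                     if compare_dice(d, d1) < 0 and compare_dice(d1, d2) < 0 \
--                             and compare_dice(d2, d) < 0:
--                         return 'yes'
--
--     return 'no'
-- ===== SOURCE B (Python) =====
-- def d3_exists(d1, d2):
--     c = sum((a > b) - (a < b) for a in d1 for b in d2)
--     if c == 0:
--         return 'no'
--     scores = [(sum((v > x) - (v < x) for x in d1),
--                sum((v > x) - (v < x) for x in d2)) for v in range(1, 11)]
--     reach = {(0, 0)}
--     for _ in range(4):
--         reach = {(sa + pa, sb + pb) for (sa, sb) in reach for (pa, pb) in scores}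
--     if c > 0:
--         return 'yes' if any(sa > 0 and sb < 0 for (sa, sb) in reach) else 'no'
--     return 'yes' if any(sa < 0 and sb > 0 for (sa, sb) in reach) else 'no'
-- ===== Notes on version B (the rewrite author's own statement) =====
-- stated objective: faster
-- what changed: Instead of brute-forcing all 10^4 candidate dice and running up to six O(|d1|+|d2|) compare_dice scans for each, B precomputes each face value's sign-score against d1 and d2 in one pass and runs a reachable-(scoreA,scoreB) set DP over the four faces, then checks the fixed-size reachable set once.
import Mathlib
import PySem

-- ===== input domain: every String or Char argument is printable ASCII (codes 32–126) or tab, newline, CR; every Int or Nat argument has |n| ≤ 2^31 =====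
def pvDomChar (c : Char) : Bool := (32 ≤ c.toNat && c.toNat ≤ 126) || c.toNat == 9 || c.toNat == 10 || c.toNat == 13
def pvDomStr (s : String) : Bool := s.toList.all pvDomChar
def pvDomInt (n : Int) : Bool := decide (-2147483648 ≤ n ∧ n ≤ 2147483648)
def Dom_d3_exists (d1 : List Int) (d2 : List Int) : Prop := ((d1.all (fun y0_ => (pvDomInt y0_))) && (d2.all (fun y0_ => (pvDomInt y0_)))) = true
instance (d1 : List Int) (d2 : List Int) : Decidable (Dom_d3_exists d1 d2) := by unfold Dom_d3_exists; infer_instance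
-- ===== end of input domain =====

-- B replaces A's brute force over all 10^4 candidate dice (six compare_dice scans each) by a
-- reachable-(scoreA,scoreB) set DP over the four faces after one precomputation pass (objective: faster).

-- ===== PORT A =====
def compare_dice (d1 : List Int) (d2 : List Int) : Int :=
  d1.foldl (fun result n1 =>
    d2.foldl (fun result n2 =>
      if n1 > n2 then result + 1 else if n1 < n2 then result - 1 else result) result) 0

def d3_exists (d1 : List Int) (d2 : List Int) : String :=
  ((PySem.List.pyRange 1 11 1).findSome? (fun n1 =>
   (PySem.List.pyRange 1 11 1).findSome? (fun n2 =>
   (PySem.List.pyRange 1 11 1).findSome? (fun n3 =>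
   (PySem.List.pyRange 1 11 1).findSome? (fun n4 =>
     let d := [n1, n2, n3, n4]
     if compare_dice d d1 > 0 ∧ compare_dice d1 d2 > 0 ∧ compare_dice d2 d > 0 then some "yes"
     else if compare_dice d d1 < 0 ∧ compare_dice d1 d2 < 0 ∧ compare_dice d2 d < 0 then some "yes"
     else none))))).getD "no"

-- ===== PORT B =====
-- (a > b) - (a < b), the sign summand Source B uses
def sgnDiff (a : Int) (b : Int) : Int :=
  (if a > b then 1 else 0) - (if a < b then 1 else 0)

def d3_exists_alt (d1 : List Int) (d2 : List Int) : String :=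
  let c := (d1.flatMap fun a => d2.map fun b => sgnDiff a b).sum
  if c = 0 then "no"
  else
    let scores := (PySem.List.pyRange 1 11 1).map fun v =>
      ((d1.map fun x => sgnDiff v x).sum, (d2.map fun x => sgnDiff v x).sum)
    let reach := (List.range 4).foldl
      (fun reach _ =>
        PySem.Set.ofList (reach.flatMap fun p => scores.map fun q => (p.1 + q.1, p.2 + q.2)))
      (PySem.Set.ofList [((0 : Int), (0 : Int))])
    if c > 0 then
      if reach.any fun p => decide (p.1 > 0) && decide (p.2 < 0) then "yes" else "no"
    else
      if reach.any fun p => decide (p.1 < 0) && decide (p.2 > 0) then "yes" else "no"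

-- ===== PRECONDITION & SPEC =====
def Spec_d3_exists (d1 : List Int) (d2 : List Int) (out : String) : Prop := out = d3_exists_alt d1 d2
instance (d1 : List Int) (d2 : List Int) (out : String) : Decidable (Spec_d3_exists d1 d2 out) := by unfold Spec_d3_exists; infer_instance

-- ===== CLAIM (what is proved, stated in full; the proofs are below) =====
def Claim_equal_d3_exists : Prop := ∀ (d1 : List Int) (d2 : List Int), Dom_d3_exists d1 d2 → Spec_d3_exists d1 d2 (d3_exists d1 d2)

-- ===== LEMMAS AND PROOFS =====

-- per-face score of v against the die X
def faceScore (X : List Int) (v : Int) : Int := (X.map fun x => sgnDiff v x).sum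

lemma inner_fold_eq (X : List Int) (v : Int) (r : Int) :
    X.foldl (fun result n2 =>
      if v > n2 then result + 1 else if v < n2 then result - 1 else result) r
      = r + faceScore X v := by
  induction X generalizing r with
  | nil => simp [faceScore]
  | cons x X ih =>
    simp only [List.foldl_cons, ih, faceScore, List.map_cons, List.sum_cons, sgnDiff]
    split_ifs <;> omega

lemma compare_dice_eq (P Q : List Int) :
    compare_dice P Q = (P.map fun a => faceScore Q a).sum := by
  unfold compare_dice
  have hfun : (fun (result n1 : Int) =>
      Q.foldl (fun result n2 =>
        if n1 > n2 then result + 1 else if n1 < n2 then result - 1 else result) result)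
      = fun result n1 => result + faceScore Q n1 :=
    funext fun r => funext fun n1 => inner_fold_eq Q n1 r
  rw [hfun, PySem.List.foldl_add]
  simp

lemma sgnDiff_antisym (a b : Int) : sgnDiff a b = -sgnDiff b a := by
  unfold sgnDiff; split_ifs <;> omega

lemma faceScore_swap (Q : List Int) (a : Int) :
    (Q.map fun b => sgnDiff b a).sum = -faceScore Q a := by
  unfold faceScore
  induction Q with
  | nil => simp
  | cons q Q ih => simp [ih, sgnDiff_antisym q a]; ring

lemma compare_dice_swap (P Q : List Int) : compare_dice Q P = -compare_dice P Q := by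
  rw [compare_dice_eq, compare_dice_eq]
  induction Q with
  | nil =>
    simp
    induction P with
    | nil => simp
    | cons p P ih => simp [faceScore]
  | cons q Q ih =>
    simp only [List.map_cons, List.sum_cons, ih]
    have h1 : (P.map fun a => faceScore (q :: Q) a).sum
        = (P.map fun a => sgnDiff a q).sum + (P.map fun a => faceScore Q a).sum := by
      induction P with
      | nil => simp
      | cons p P ihp => simp only [List.map_cons, List.sum_cons, faceScore]; simp; ring
    have h2 : (P.map fun a => sgnDiff a q).sum = -faceScore P q := by
      have := faceScore_swap P q
      simpa using this
    rw [h1, h2]; ring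

lemma compare_four (X : List Int) (n1 n2 n3 n4 : Int) :
    compare_dice [n1, n2, n3, n4] X
      = faceScore X n1 + faceScore X n2 + faceScore X n3 + faceScore X n4 := by
  rw [compare_dice_eq]; simp; ring

lemma findSome?_ite_yes {α : Type} (l : List α) (p : α → Prop) [DecidablePred p] :
    (l.findSome? fun x => if p x then some "yes" else none)
      = if ∃ x ∈ l, p x then some "yes" else none := by
  induction l with
  | nil => simp
  | cons a l ih =>
    by_cases h : p a
    · simp [List.findSome?, h]
    · simp only [List.findSome?, h, ih]
      simp [h]

-- A returns "yes" exactly when some candidate die satisfies one of the two cycle conditions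
lemma d3_exists_char (d1 d2 : List Int) :
    d3_exists d1 d2 =
      if ∃ n1 ∈ PySem.List.pyRange 1 11 1, ∃ n2 ∈ PySem.List.pyRange 1 11 1,
         ∃ n3 ∈ PySem.List.pyRange 1 11 1, ∃ n4 ∈ PySem.List.pyRange 1 11 1,
         ((compare_dice [n1,n2,n3,n4] d1 > 0 ∧ compare_dice d1 d2 > 0 ∧ compare_dice d2 [n1,n2,n3,n4] > 0) ∨
          (compare_dice [n1,n2,n3,n4] d1 < 0 ∧ compare_dice d1 d2 < 0 ∧ compare_dice d2 [n1,n2,n3,n4] < 0))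
      then "yes" else "no" := by
  unfold d3_exists
  have hinner : ∀ n1 n2 n3 n4 : Int,
      (let d := [n1, n2, n3, n4]
       if compare_dice d d1 > 0 ∧ compare_dice d1 d2 > 0 ∧ compare_dice d2 d > 0 then some "yes"
       else if compare_dice d d1 < 0 ∧ compare_dice d1 d2 < 0 ∧ compare_dice d2 d < 0 then some "yes"
       else none)
      = if ((compare_dice [n1,n2,n3,n4] d1 > 0 ∧ compare_dice d1 d2 > 0 ∧ compare_dice d2 [n1,n2,n3,n4] > 0) ∨
            (compare_dice [n1,n2,n3,n4] d1 < 0 ∧ compare_dice d1 d2 < 0 ∧ compare_dice d2 [n1,n2,n3,n4] < 0))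
        then some "yes" else none := by
    intro n1 n2 n3 n4
    show (if compare_dice [n1,n2,n3,n4] d1 > 0 ∧ compare_dice d1 d2 > 0 ∧ compare_dice d2 [n1,n2,n3,n4] > 0
          then some "yes"
          else if compare_dice [n1,n2,n3,n4] d1 < 0 ∧ compare_dice d1 d2 < 0 ∧ compare_dice d2 [n1,n2,n3,n4] < 0
          then some "yes" else none) = _
    split_ifs <;> first | rfl | tauto
  simp only [hinner, findSome?_ite_yes]
  split_ifs <;> rfl

-- the one-step successor set of the reachable-(scoreA,scoreB) DP
def stepR (scores R : List (Int × Int)) : List (Int × Int) :=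
  PySem.Set.ofList (R.flatMap fun p => scores.map fun q => (p.1 + q.1, p.2 + q.2))

lemma mem_stepR (scores R : List (Int × Int)) (x : Int × Int) :
    x ∈ stepR scores R ↔ ∃ p ∈ R, ∃ q ∈ scores, x = (p.1 + q.1, p.2 + q.2) := by
  unfold stepR
  rw [PySem.Set.mem_ofList]
  simp only [List.mem_flatMap, List.mem_map]
  constructor
  · rintro ⟨p, hp, q, hq, rfl⟩; exact ⟨p, hp, q, hq, rfl⟩
  · rintro ⟨p, hp, q, hq, rfl⟩; exact ⟨p, hp, q, hq, rfl⟩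

lemma foldl_range4 {α : Type} (f : α → α) (a : α) :
    (List.range 4).foldl (fun x _ => f x) a = f (f (f (f a))) := rfl

lemma flatMap_sum_eq (d1 d2 : List Int) :
    (d1.flatMap fun a => d2.map fun b => sgnDiff a b).sum = compare_dice d1 d2 := by
  rw [compare_dice_eq]
  induction d1 with
  | nil => simp
  | cons a d1 ih => simp [ih, faceScore]

-- membership in the four-step reachable set = the four face scores of some candidate die
lemma reach_mem (d1 d2 : List Int) (x : Int × Int) :
    (x ∈ (List.range 4).foldl
      (fun reach _ => stepR ((PySem.List.pyRange 1 11 1).map fun v =>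
        ((d1.map fun y => sgnDiff v y).sum, (d2.map fun y => sgnDiff v y).sum)) reach)
      (PySem.Set.ofList [((0 : Int), (0 : Int))]))
    ↔ ∃ n1 ∈ PySem.List.pyRange 1 11 1, ∃ n2 ∈ PySem.List.pyRange 1 11 1,
      ∃ n3 ∈ PySem.List.pyRange 1 11 1, ∃ n4 ∈ PySem.List.pyRange 1 11 1,
      x = (faceScore d1 n1 + faceScore d1 n2 + faceScore d1 n3 + faceScore d1 n4,
           faceScore d2 n1 + faceScore d2 n2 + faceScore d2 n3 + faceScore d2 n4) := by
  rw [foldl_range4]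
  have hsc : ∀ q : Int × Int,
      (q ∈ (PySem.List.pyRange 1 11 1).map fun v =>
        ((d1.map fun y => sgnDiff v y).sum, (d2.map fun y => sgnDiff v y).sum))
      ↔ ∃ v ∈ PySem.List.pyRange 1 11 1, q = (faceScore d1 v, faceScore d2 v) := by
    intro q
    simp only [List.mem_map, faceScore]
    constructor
    · rintro ⟨v, hv, rfl⟩; exact ⟨v, hv, rfl⟩
    · rintro ⟨v, hv, rfl⟩; exact ⟨v, hv, rfl⟩
  have h0 : ∀ y : Int × Int, y ∈ PySem.Set.ofList [((0 : Int), (0 : Int))] ↔ y = (0, 0) := by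
    intro y; rw [PySem.Set.mem_ofList]; simp
  constructor
  · intro hx
    rw [mem_stepR] at hx
    obtain ⟨p3, hp3, q4, hq4, rfl⟩ := hx
    rw [mem_stepR] at hp3
    obtain ⟨p2, hp2, q3, hq3, rfl⟩ := hp3
    rw [mem_stepR] at hp2
    obtain ⟨p1, hp1, q2, hq2, rfl⟩ := hp2
    rw [mem_stepR] at hp1
    obtain ⟨p0, hp0, q1, hq1, rfl⟩ := hp1
    rw [h0] at hp0
    subst hp0
    obtain ⟨v1, hv1, rfl⟩ := (hsc q1).1 hq1
    obtain ⟨v2, hv2, rfl⟩ := (hsc q2).1 hq2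
    obtain ⟨v3, hv3, rfl⟩ := (hsc q3).1 hq3
    obtain ⟨v4, hv4, rfl⟩ := (hsc q4).1 hq4
    refine ⟨v1, hv1, v2, hv2, v3, hv3, v4, hv4, ?_⟩
    simp
  · rintro ⟨v1, hv1, v2, hv2, v3, hv3, v4, hv4, rfl⟩
    rw [mem_stepR]
    refine ⟨(faceScore d1 v1 + faceScore d1 v2 + faceScore d1 v3,
             faceScore d2 v1 + faceScore d2 v2 + faceScore d2 v3), ?_,
            (faceScore d1 v4, faceScore d2 v4), (hsc _).2 ⟨v4, hv4, rfl⟩, rfl⟩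
    rw [mem_stepR]
    refine ⟨(faceScore d1 v1 + faceScore d1 v2, faceScore d2 v1 + faceScore d2 v2), ?_,
            (faceScore d1 v3, faceScore d2 v3), (hsc _).2 ⟨v3, hv3, rfl⟩, rfl⟩
    rw [mem_stepR]
    refine ⟨(faceScore d1 v1, faceScore d2 v1), ?_,
            (faceScore d1 v2, faceScore d2 v2), (hsc _).2 ⟨v2, hv2, rfl⟩, by simp⟩
    rw [mem_stepR]
    exact ⟨((0 : Int), (0 : Int)), (h0 _).2 rfl,
           (faceScore d1 v1, faceScore d2 v1), (hsc _).2 ⟨v1, hv1, rfl⟩, by simp⟩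

-- ===== VERDICT (by name: the statement is the Claim_ definition above) =====
theorem d3_exists_spec : Claim_equal_d3_exists := by
  intro d1 d2 _
  unfold Spec_d3_exists
  simp only [d3_exists_alt]
  rw [d3_exists_char]
  rw [show (fun (reach : List (Int × Int)) (_ : Nat) =>
        PySem.Set.ofList (reach.flatMap fun p =>
          ((PySem.List.pyRange 1 11 1).map fun v =>
            ((d1.map fun x => sgnDiff v x).sum, (d2.map fun x => sgnDiff v x).sum)).map
            fun q => (p.1 + q.1, p.2 + q.2)))
      = fun reach _ => stepR ((PySem.List.pyRange 1 11 1).map fun v =>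
          ((d1.map fun y => sgnDiff v y).sum, (d2.map fun y => sgnDiff v y).sum)) reach from rfl]
  rw [flatMap_sum_eq]
  have hquad : ∀ n1 n2 n3 n4 : Int,
      compare_dice [n1, n2, n3, n4] d1
        = faceScore d1 n1 + faceScore d1 n2 + faceScore d1 n3 + faceScore d1 n4 ∧
      compare_dice d2 [n1, n2, n3, n4]
        = -(faceScore d2 n1 + faceScore d2 n2 + faceScore d2 n3 + faceScore d2 n4) := by
    intro n1 n2 n3 n4
    exact ⟨compare_four d1 n1 n2 n3 n4, by rw [compare_dice_swap, compare_four]⟩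
  by_cases hc0 : compare_dice d1 d2 = 0
  · rw [if_pos hc0, if_neg]
    rintro ⟨n1, -, n2, -, n3, -, n4, -, h | h⟩ <;> omega
  · rw [if_neg hc0]
    by_cases hcp : compare_dice d1 d2 > 0
    · rw [if_pos hcp]
      have hiff : (∃ n1 ∈ PySem.List.pyRange 1 11 1, ∃ n2 ∈ PySem.List.pyRange 1 11 1,
          ∃ n3 ∈ PySem.List.pyRange 1 11 1, ∃ n4 ∈ PySem.List.pyRange 1 11 1,
          ((compare_dice [n1,n2,n3,n4] d1 > 0 ∧ compare_dice d1 d2 > 0 ∧ compare_dice d2 [n1,n2,n3,n4] > 0) ∨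
           (compare_dice [n1,n2,n3,n4] d1 < 0 ∧ compare_dice d1 d2 < 0 ∧ compare_dice d2 [n1,n2,n3,n4] < 0)))
        ↔ ((List.range 4).foldl
            (fun reach _ => stepR ((PySem.List.pyRange 1 11 1).map fun v =>
              ((d1.map fun y => sgnDiff v y).sum, (d2.map fun y => sgnDiff v y).sum)) reach)
            (PySem.Set.ofList [((0 : Int), (0 : Int))])).any
            (fun p => decide (p.1 > 0) && decide (p.2 < 0)) = true := by
        rw [List.any_eq_true]
        constructor
        · rintro ⟨n1, h1, n2, h2, n3, h3, n4, h4, h | h⟩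
          · obtain ⟨ha, -, hb⟩ := h
            obtain ⟨e1, e2⟩ := hquad n1 n2 n3 n4
            refine ⟨_, (reach_mem d1 d2 _).2 ⟨n1, h1, n2, h2, n3, h3, n4, h4, rfl⟩, ?_⟩
            simp only [decide_eq_true_eq, Bool.and_eq_true]
            constructor <;> omega
          · omega
        · rintro ⟨x, hx, hpx⟩
          obtain ⟨n1, h1, n2, h2, n3, h3, n4, h4, rfl⟩ := (reach_mem d1 d2 _).1 hx
          simp only [decide_eq_true_eq, Bool.and_eq_true] at hpx
          obtain ⟨e1, e2⟩ := hquad n1 n2 n3 n4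
          exact ⟨n1, h1, n2, h2, n3, h3, n4, h4, Or.inl ⟨by omega, hcp, by omega⟩⟩
      rw [if_congr hiff rfl rfl]
    · have hcn : compare_dice d1 d2 < 0 := by omega
      rw [if_neg hcp]
      have hiff : (∃ n1 ∈ PySem.List.pyRange 1 11 1, ∃ n2 ∈ PySem.List.pyRange 1 11 1,
          ∃ n3 ∈ PySem.List.pyRange 1 11 1, ∃ n4 ∈ PySem.List.pyRange 1 11 1,
          ((compare_dice [n1,n2,n3,n4] d1 > 0 ∧ compare_dice d1 d2 > 0 ∧ compare_dice d2 [n1,n2,n3,n4] > 0) ∨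
           (compare_dice [n1,n2,n3,n4] d1 < 0 ∧ compare_dice d1 d2 < 0 ∧ compare_dice d2 [n1,n2,n3,n4] < 0)))
        ↔ ((List.range 4).foldl
            (fun reach _ => stepR ((PySem.List.pyRange 1 11 1).map fun v =>
              ((d1.map fun y => sgnDiff v y).sum, (d2.map fun y => sgnDiff v y).sum)) reach)
            (PySem.Set.ofList [((0 : Int), (0 : Int))])).any
            (fun p => decide (p.1 < 0) && decide (p.2 > 0)) = true := by
        rw [List.any_eq_true]
        constructor
        · rintro ⟨n1, h1, n2, h2, n3, h3, n4, h4, h | h⟩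
          · omega
          · obtain ⟨ha, -, hb⟩ := h
            obtain ⟨e1, e2⟩ := hquad n1 n2 n3 n4
            refine ⟨_, (reach_mem d1 d2 _).2 ⟨n1, h1, n2, h2, n3, h3, n4, h4, rfl⟩, ?_⟩
            simp only [decide_eq_true_eq, Bool.and_eq_true]
            constructor <;> omega
        · rintro ⟨x, hx, hpx⟩
          obtain ⟨n1, h1, n2, h2, n3, h3, n4, h4, rfl⟩ := (reach_mem d1 d2 _).1 hx
          simp only [decide_eq_true_eq, Bool.and_eq_true] at hpx
          obtain ⟨e1, e2⟩ := hquad n1 n2 n3 n4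
          exact ⟨n1, h1, n2, h2, n3, h3, n4, h4, Or.inr ⟨by omega, hcn, by omega⟩⟩
      rw [if_congr hiff rfl rfl]
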